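-- pv_equiv track=rewrite | github.com/CognitiveComputationLab/ccobra | ccobra/propositional/task_encoder_prop.py | encode_clause
-- ===== SOURCE A (Python) =====
-- OPERATORS = [
--     'not',
--     'and',
--     'or',
--     'iff',
--     'if'
-- ]
--
-- def encode_clause(clause):
--     """ Encodes a single clause by parsing the Polish normal form.
--
--     Parameters
--     ----------
--     clause : list(str)
--         Propositional clause in list representation (e.g., ['If', 'not', 'A', 'B']).
--
--     Returns
--     -------
--     str
--         String representation of the input clause (e.g., "~A -> B").
--
--     """
--
--     # Parse the clause in reverse
--     stack = []
--     for term in reversed(clause):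
--         norm_term = term.lower()
--         if norm_term in OPERATORS:
--             if norm_term == 'not':
--                 stack.append('~{}'.format(stack.pop()))
--             elif norm_term == 'and':
--                 stack.append('({} & {})'.format(stack.pop(), stack.pop()))
--             elif norm_term == 'or':
--                 stack.append('({} | {})'.format(stack.pop(), stack.pop()))
--             elif norm_term == 'iff':
--                 stack.append('({} <=> {})'.format(stack.pop(), stack.pop()))
--             elif norm_term == 'if':
--                 stack.append('({} -> {})'.format(stack.pop(), stack.pop()))
--         else:
--             stack.append(term)
--
--     assert len(stack) == 1, 'Error: {} -> {}'.format(clause, stack)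
--     return stack[0]
-- ===== SOURCE B (Python) =====
-- OPERATORS = [
--     'not',
--     'and',
--     'or',
--     'iff',
--     'if'
-- ]
--
-- def encode_clause(clause):
--     """Recursive-descent parser over the prefix token list using an index."""
--     def parse(i):
--         term = clause[i]
--         nt = term.lower()
--         if nt == 'not':
--             x, j = parse(i + 1)
--             return '~{}'.format(x), j
--         elif nt == 'and':
--             x, j = parse(i + 1)
--             y, k = parse(j)
--             return '({} & {})'.format(x, y), k
--         elif nt == 'or':
--             x, j = parse(i + 1)
--             y, k = parse(j)
--             return '({} | {})'.format(x, y), k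
--         elif nt == 'iff':
--             x, j = parse(i + 1)
--             y, k = parse(j)
--             return '({} <=> {})'.format(x, y), k
--         elif nt == 'if':
--             x, j = parse(i + 1)
--             y, k = parse(j)
--             return '({} -> {})'.format(x, y), k
--         else:
--             return term, i + 1
--
--     assert len(clause) > 0, 'Error: {} -> []'.format(clause)
--     result, nxt = parse(0)
--     assert nxt == len(clause), 'Error: {} leftover tokens'.format(clause)
--     return result
-- ===== Notes on version B (the rewrite author's own statement) =====
-- stated objective: alternative
-- what changed: Replaced the reverse right-to-left stack evaluation by a left-to-right recursive-descent parser over an index that returns (subformula string, next index).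
import Mathlib
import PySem

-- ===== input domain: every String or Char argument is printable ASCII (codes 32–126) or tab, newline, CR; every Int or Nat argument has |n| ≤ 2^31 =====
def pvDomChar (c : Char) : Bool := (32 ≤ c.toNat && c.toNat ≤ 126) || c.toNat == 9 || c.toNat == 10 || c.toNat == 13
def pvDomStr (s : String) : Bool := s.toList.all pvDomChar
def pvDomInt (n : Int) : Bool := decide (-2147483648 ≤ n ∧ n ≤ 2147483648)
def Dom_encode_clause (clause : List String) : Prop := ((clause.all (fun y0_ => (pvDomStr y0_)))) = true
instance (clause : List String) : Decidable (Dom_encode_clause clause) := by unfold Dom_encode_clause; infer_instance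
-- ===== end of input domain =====

-- B replaces A's reversed-scan stack evaluator by a left-to-right recursive-descent
-- parser (alternative decomposition, same cost); A = B on well-formed Polish clauses.


-- ===== PORT A =====
def pvOPERATORS : List String := ["not", "and", "or", "iff", "if"]

-- one iteration of A's loop body: term processed against the current stack
def pvStepA (term : String) (stack : List String) : List String :=
  let nt := PySem.Str.lower term
  if nt ∈ pvOPERATORS then
    if nt = "not" then
      match stack with
      | x :: s => ("~" ++ x) :: s
      | [] => []                      -- stack.pop() on empty: IndexError, excluded by Pre_
    else if nt = "and" then
      match stack with
      | x :: y :: s => ("(" ++ x ++ " & " ++ y ++ ")") :: s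
      | _ => []                       -- IndexError, excluded by Pre_
    else if nt = "or" then
      match stack with
      | x :: y :: s => ("(" ++ x ++ " | " ++ y ++ ")") :: s
      | _ => []                       -- IndexError, excluded by Pre_
    else if nt = "iff" then
      match stack with
      | x :: y :: s => ("(" ++ x ++ " <=> " ++ y ++ ")") :: s
      | _ => []                       -- IndexError, excluded by Pre_
    else if nt = "if" then
      match stack with
      | x :: y :: s => ("(" ++ x ++ " -> " ++ y ++ ")") :: s
      | _ => []                       -- IndexError, excluded by Pre_
    else stack
  else term :: stack

def encode_clause (clause : List String) : String :=
  -- for term in reversed(clause): …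
  let stack := (clause.reverse).foldl (fun s t => pvStepA t s) []
  match stack with
  | [x] => x
  | _ => ""                           -- assert len(stack) == 1 fails: AssertionError, excluded by Pre_

-- ===== PORT B =====
-- recursive-descent parse(i) from Source B; the remaining suffix plays the role of the index i,
-- fuel = clause.length bounds the recursion depth (parse always advances)
def pvParse : Nat → List String → Option (String × List String)
  | 0, _ => none                      -- fuel exhausted (never happens with fuel = length)
  | _ + 1, [] => none                 -- clause[i] out of range: IndexError, excluded by Pre_
  | n + 1, term :: rest =>
    let nt := PySem.Str.lower term
    if nt = "not" then
      match pvParse n rest with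
      | some (x, r) => some ("~" ++ x, r)
      | none => none
    else if nt = "and" then
      match pvParse n rest with
      | some (x, r1) =>
        match pvParse n r1 with
        | some (y, r2) => some ("(" ++ x ++ " & " ++ y ++ ")", r2)
        | none => none
      | none => none
    else if nt = "or" then
      match pvParse n rest with
      | some (x, r1) =>
        match pvParse n r1 with
        | some (y, r2) => some ("(" ++ x ++ " | " ++ y ++ ")", r2)
        | none => none
      | none => none
    else if nt = "iff" then
      match pvParse n rest with
      | some (x, r1) =>
        match pvParse n r1 with
        | some (y, r2) => some ("(" ++ x ++ " <=> " ++ y ++ ")", r2)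
        | none => none
      | none => none
    else if nt = "if" then
      match pvParse n rest with
      | some (x, r1) =>
        match pvParse n r1 with
        | some (y, r2) => some ("(" ++ x ++ " -> " ++ y ++ ")", r2)
        | none => none
      | none => none
    else
      some (term, rest)

def encode_clause_alt (clause : List String) : String :=
  match pvParse clause.length clause with
  | some (x, r) => if r.isEmpty then x else ""  -- assert nxt == len(clause): leftover tokens raise, excluded by Pre_
  | none => ""                        -- empty clause / missing operand: B raises, excluded by Pre_

-- ===== PRECONDITION & SPEC =====
-- token weight: 1 - arity (atom: 1, not: 0, binary operator: -1)
def pvW (t : String) : Int :=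
  let nt := PySem.Str.lower t
  if nt = "not" then 0
  else if nt ∈ ["and", "or", "iff", "if"] then -1
  else 1

def pvWsum (ts : List String) : Int := (ts.map pvW).sum

-- exactly the well-formed Polish-notation clauses: A (and B) raise AssertionError/IndexError otherwise
def Pre_encode_clause (clause : List String) : Prop :=
  clause ≠ [] ∧ pvWsum clause = 1 ∧ ∀ s ∈ clause.tails, s ≠ [] → 1 ≤ pvWsum s
instance (clause : List String) : Decidable (Pre_encode_clause clause) := by
  unfold Pre_encode_clause; infer_instance

def pvWitness_encode_clause : List String := ["If", "not", "A", "B"]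

def Spec_encode_clause (clause : List String) (out : String) : Prop := out = encode_clause_alt clause
instance (clause : List String) (out : String) : Decidable (Spec_encode_clause clause out) := by unfold Spec_encode_clause; infer_instance

-- ===== CLAIM (what is proved, stated in full; the proofs are below) =====
def Claim_equal_encode_clause : Prop := ∀ (clause : List String), Dom_encode_clause clause → Pre_encode_clause clause → Spec_encode_clause clause (encode_clause clause)

-- ===== LEMMAS AND PROOFS =====

-- a successful parse of ts splits it into a parsed prefix f and the rest r,
-- and A's stack machine pushes exactly the parsed string when run over f
lemma pvParse_fold (n : Nat) : ∀ ts x r, pvParse n ts = some (x, r) →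
    ∃ f, ts = f ++ r ∧ ∀ s : List String, f.foldr pvStepA s = x :: s := by
  induction n with
  | zero => intro ts x r h; simp [pvParse] at h
  | succ n ih =>
    intro ts x r h
    cases ts with
    | nil => simp [pvParse] at h
    | cons t rest =>
      simp only [pvParse] at h
      by_cases h1 : PySem.Str.lower t = "not"
      · simp only [h1, if_pos] at h
        cases e1 : pvParse n rest with
        | none => rw [e1] at h; simp at h
        | some p =>
          obtain ⟨x1, r1⟩ := p
          rw [e1] at h; simp at h
          obtain ⟨hx, hr⟩ := h
          obtain ⟨f1, hf1, hfold1⟩ := ih rest x1 r1 e1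
          refine ⟨t :: f1, by simp [hf1, hr], fun s => ?_⟩
          simp only [List.foldr_cons, hfold1]
          simp [pvStepA, h1, pvOPERATORS, ← hx]
      · rw [if_neg h1] at h
        by_cases h2 : PySem.Str.lower t = "and"
        · rw [if_pos h2] at h
          cases e1 : pvParse n rest with
          | none => rw [e1] at h; simp at h
          | some p1 =>
            obtain ⟨x1, r1⟩ := p1
            simp only [e1] at h
            cases e2 : pvParse n r1 with
            | none => rw [e2] at h; simp at h
            | some p2 =>
              obtain ⟨y1, r2⟩ := p2
              rw [e2] at h; simp at h
              obtain ⟨hx, hr⟩ := h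
              obtain ⟨f1, hf1, hfold1⟩ := ih rest x1 r1 e1
              obtain ⟨f2, hf2, hfold2⟩ := ih r1 y1 r2 e2
              refine ⟨t :: (f1 ++ f2), by simp [hf1, hf2, hr], fun s => ?_⟩
              simp only [List.foldr_cons, List.foldr_append, hfold2, hfold1]
              simp [pvStepA, h2, pvOPERATORS, ← hx]
        · rw [if_neg h2] at h
          by_cases h3 : PySem.Str.lower t = "or"
          · rw [if_pos h3] at h
            cases e1 : pvParse n rest with
            | none => rw [e1] at h; simp at h
            | some p1 =>
              obtain ⟨x1, r1⟩ := p1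
              simp only [e1] at h
              cases e2 : pvParse n r1 with
              | none => rw [e2] at h; simp at h
              | some p2 =>
                obtain ⟨y1, r2⟩ := p2
                rw [e2] at h; simp at h
                obtain ⟨hx, hr⟩ := h
                obtain ⟨f1, hf1, hfold1⟩ := ih rest x1 r1 e1
                obtain ⟨f2, hf2, hfold2⟩ := ih r1 y1 r2 e2
                refine ⟨t :: (f1 ++ f2), by simp [hf1, hf2, hr], fun s => ?_⟩
                simp only [List.foldr_cons, List.foldr_append, hfold2, hfold1]
                simp [pvStepA, h3, pvOPERATORS, ← hx]
          · rw [if_neg h3] at h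
            by_cases h4 : PySem.Str.lower t = "iff"
            · rw [if_pos h4] at h
              cases e1 : pvParse n rest with
              | none => rw [e1] at h; simp at h
              | some p1 =>
                obtain ⟨x1, r1⟩ := p1
                simp only [e1] at h
                cases e2 : pvParse n r1 with
                | none => rw [e2] at h; simp at h
                | some p2 =>
                  obtain ⟨y1, r2⟩ := p2
                  rw [e2] at h; simp at h
                  obtain ⟨hx, hr⟩ := h
                  obtain ⟨f1, hf1, hfold1⟩ := ih rest x1 r1 e1
                  obtain ⟨f2, hf2, hfold2⟩ := ih r1 y1 r2 e2
                  refine ⟨t :: (f1 ++ f2), by simp [hf1, hf2, hr], fun s => ?_⟩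
                  simp only [List.foldr_cons, List.foldr_append, hfold2, hfold1]
                  simp [pvStepA, h4, pvOPERATORS, ← hx]
            · rw [if_neg h4] at h
              by_cases h5 : PySem.Str.lower t = "if"
              · rw [if_pos h5] at h
                cases e1 : pvParse n rest with
                | none => rw [e1] at h; simp at h
                | some p1 =>
                  obtain ⟨x1, r1⟩ := p1
                  simp only [e1] at h
                  cases e2 : pvParse n r1 with
                  | none => rw [e2] at h; simp at h
                  | some p2 =>
                    obtain ⟨y1, r2⟩ := p2
                    rw [e2] at h; simp at h
                    obtain ⟨hx, hr⟩ := h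
                    obtain ⟨f1, hf1, hfold1⟩ := ih rest x1 r1 e1
                    obtain ⟨f2, hf2, hfold2⟩ := ih r1 y1 r2 e2
                    refine ⟨t :: (f1 ++ f2), by simp [hf1, hf2, hr], fun s => ?_⟩
                    simp only [List.foldr_cons, List.foldr_append, hfold2, hfold1]
                    simp [pvStepA, h5, pvOPERATORS, ← hx]
              · rw [if_neg h5] at h
                simp at h
                obtain ⟨hx, hr⟩ := h
                have hnm : PySem.Str.lower t ∉ pvOPERATORS := by
                  simp [pvOPERATORS, h1, h2, h3, h4, h5]
                refine ⟨[t], by simp [hr], fun s => ?_⟩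
                simp [pvStepA, hnm, ← hx]

-- under the suffix-weight condition, parsing succeeds and consumes weight exactly 1
lemma pvParse_ok (n : Nat) : ∀ ts : List String, ts.length ≤ n → ts ≠ [] →
    (∀ s ∈ ts.tails, s ≠ [] → 1 ≤ pvWsum s) →
    ∃ x r, pvParse n ts = some (x, r) ∧ pvWsum ts = 1 + pvWsum r ∧ r <:+ ts := by
  induction n with
  | zero =>
    intro ts hl hne _
    cases ts with
    | nil => exact absurd rfl hne
    | cons t rest => simp at hl
  | succ n ih =>
    intro ts hl hne hsuf
    cases ts with
    | nil => exact absurd rfl hne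
    | cons t rest =>
      have hrl : rest.length ≤ n := by simpa using hl
      have hsufr : ∀ s ∈ rest.tails, s ≠ [] → 1 ≤ pvWsum s := by
        intro s hs
        rw [List.mem_tails] at hs
        exact hsuf s ((List.mem_tails s (t :: rest)).mpr (hs.trans (List.suffix_cons t rest)))
      have hts1 : 1 ≤ pvWsum (t :: rest) :=
        hsuf (t :: rest) ((List.mem_tails _ _).mpr List.suffix_rfl) (by simp)
      have hsum : pvWsum (t :: rest) = pvW t + pvWsum rest := by simp [pvWsum]
      by_cases h1 : PySem.Str.lower t = "not"
      · have hw : pvW t = 0 := by simp [pvW, h1]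
        have hrne : rest ≠ [] := by
          intro hr
          have h0 : pvWsum [t] = 0 := by simp [pvWsum, hw]
          rw [hr] at hts1
          omega
        obtain ⟨x, r, he, hwr, hsfx⟩ := ih rest hrl hrne hsufr
        refine ⟨"~" ++ x, r, ?_, by omega, hsfx.trans (List.suffix_cons t rest)⟩
        simp [pvParse, h1, he]
      · by_cases hb : PySem.Str.lower t = "and" ∨ PySem.Str.lower t = "or" ∨
            PySem.Str.lower t = "iff" ∨ PySem.Str.lower t = "if"
        · have hw : pvW t = -1 := by
            rcases hb with h | h | h | h <;> simp [pvW, h]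
          have hrne : rest ≠ [] := by
            intro hr
            have : pvWsum rest = 0 := by rw [hr]; simp [pvWsum]
            omega
          obtain ⟨x, r1, he1, hwr1, hsfx1⟩ := ih rest hrl hrne hsufr
          have hsufr1 : ∀ s ∈ r1.tails, s ≠ [] → 1 ≤ pvWsum s := by
            intro s hs hsne
            rw [List.mem_tails] at hs
            exact hsufr s ((List.mem_tails s rest).mpr (hs.trans hsfx1)) hsne
          have hr1ne : r1 ≠ [] := by
            intro hr
            have : pvWsum r1 = 0 := by rw [hr]; simp [pvWsum]
            omega
          obtain ⟨y, r2, he2, hwr2, hsfx2⟩ :=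
            ih r1 (le_trans hsfx1.length_le hrl) hr1ne hsufr1
          have hsfx : r2 <:+ t :: rest :=
            (hsfx2.trans hsfx1).trans (List.suffix_cons t rest)
          rcases hb with h | h | h | h
          · exact ⟨"(" ++ x ++ " & " ++ y ++ ")", r2, by simp [pvParse, h, he1, he2],
              by omega, hsfx⟩
          · exact ⟨"(" ++ x ++ " | " ++ y ++ ")", r2, by simp [pvParse, h, he1, he2],
              by omega, hsfx⟩
          · exact ⟨"(" ++ x ++ " <=> " ++ y ++ ")", r2, by simp [pvParse, h, he1, he2],
              by omega, hsfx⟩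
          · exact ⟨"(" ++ x ++ " -> " ++ y ++ ")", r2, by simp [pvParse, h, he1, he2],
              by omega, hsfx⟩
        · rw [not_or, not_or, not_or] at hb
          obtain ⟨h2, h3, h4, h5⟩ := hb
          refine ⟨t, rest, by simp [pvParse, h1, h2, h3, h4, h5], ?_,
            List.suffix_cons t rest⟩
          have hw : pvW t = 1 := by simp [pvW, h1, h2, h3, h4, h5]
          omega

-- ===== VERDICT (by name: the statement is the Claim_ definition above) =====
theorem encode_clause_spec : Claim_equal_encode_clause := by
  intro clause _ hpre
  obtain ⟨hne, hw1, hsuf⟩ := hpre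
  obtain ⟨x, r, he, hwr, hsfx⟩ := pvParse_ok clause.length clause le_rfl hne hsuf
  have hr : r = [] := by
    by_contra hrne
    have := hsuf r ((List.mem_tails _ _).mpr hsfx) hrne
    omega
  subst hr
  obtain ⟨f, hf, hfold⟩ := pvParse_fold clause.length clause x [] he
  have hfc : f = clause := by simpa using hf.symm
  show encode_clause clause = encode_clause_alt clause
  unfold encode_clause encode_clause_alt
  rw [he, List.foldl_reverse]
  have : clause.foldr (fun t s => pvStepA t s) [] = [x] := by
    rw [← hfc]; exact hfold []
  simp [this]
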